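-- pv_equiv track=rewrite | github.com/juliogdomingues/PO_ufmg | simplex.py | convert_problem_to_standard_form
-- ===== SOURCE A (Python) =====
-- def convert_problem_to_standard_form(num_rows, num_cols, mat, obj_coefs, rhs, eq_flags):
--     """
--     Converts the problem to standard form (adds slack variables and RHS column).
--     eq_flags[i] = 1 if equality constraint, 0 otherwise.
--     """
--     for i in range(len(eq_flags)):
--         if not eq_flags[i]:
--             obj_coefs.append(0)
--             num_cols += 1
--             for r in range(num_rows):
--                 mat[r].append(1 if i == r else 0)
--
--     for r in range(num_rows):
--         mat[r].append(rhs[r])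
--
--     return num_rows, num_cols, mat, obj_coefs, rhs
-- ===== SOURCE B (Python) =====
-- def convert_problem_to_standard_form(num_rows, num_cols, mat, obj_coefs, rhs, eq_flags):
--     """
--     Converts the problem to standard form (adds slack variables and RHS column).
--     eq_flags[i] = 1 if equality constraint, 0 otherwise.
--
--     Builds an index map from inequality index to slack column once, then makes a
--     single row-major pass that extends each row with its one-hot slack block and
--     its RHS entry in one go.
--     """
--     slacks = [i for i, f in enumerate(eq_flags) if not f]
--     slack_col = {}
--     for c, i in enumerate(slacks):
--         slack_col[i] = c
--     k = len(slacks)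
--     for r in range(num_rows):
--         block = [0] * k
--         if r in slack_col:
--             block[slack_col[r]] = 1
--         mat[r] += block + [rhs[r]]
--     obj_coefs += [0] * k
--     return num_rows, num_cols + k, mat, obj_coefs, rhs
-- ===== Notes on version B (the rewrite author's own statement) =====
-- stated objective: alternative
-- what changed: B first builds a hash map from inequality index to slack column position, then makes a single row-major pass that extends each row once with a one-hot slack block (placed by dict lookup, no per-slack i==r comparisons) plus its RHS entry, instead of A's column-major nested loops that append one slack column to every row per inequality followed by a separate RHS pass.
import Mathlib
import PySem

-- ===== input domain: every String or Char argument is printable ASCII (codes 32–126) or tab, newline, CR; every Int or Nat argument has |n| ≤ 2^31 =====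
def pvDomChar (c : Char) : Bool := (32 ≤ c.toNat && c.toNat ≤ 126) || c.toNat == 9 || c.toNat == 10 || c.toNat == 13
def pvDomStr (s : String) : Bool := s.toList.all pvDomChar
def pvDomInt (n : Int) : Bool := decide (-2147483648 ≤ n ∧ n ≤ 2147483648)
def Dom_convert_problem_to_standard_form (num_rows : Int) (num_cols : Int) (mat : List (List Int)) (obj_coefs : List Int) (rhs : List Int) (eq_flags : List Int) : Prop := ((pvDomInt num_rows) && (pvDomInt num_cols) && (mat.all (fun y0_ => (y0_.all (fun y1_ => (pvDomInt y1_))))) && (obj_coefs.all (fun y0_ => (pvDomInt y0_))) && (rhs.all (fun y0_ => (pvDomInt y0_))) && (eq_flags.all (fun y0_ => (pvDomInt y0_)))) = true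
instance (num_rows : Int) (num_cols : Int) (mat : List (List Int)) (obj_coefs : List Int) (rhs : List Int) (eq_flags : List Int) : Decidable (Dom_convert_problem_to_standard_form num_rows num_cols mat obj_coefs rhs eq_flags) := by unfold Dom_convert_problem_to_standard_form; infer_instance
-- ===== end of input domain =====

-- B builds an index map (inequality index -> slack column) once and extends each row in a single row-major pass with a one-hot block placed by dict lookup plus the RHS entry (alternative decomposition, same cost); A and B mutate mat/obj_coefs in place in Python — the equivalence proved is about the RETURN value.


-- ===== PORT A =====
-- helper: Python's repeated inner loop shape 'for r in range(num_rows): mat[r].append(f(r))'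
-- (pySetD/pyGetD: out-of-range mat[r] is a Python IndexError, excluded by Pre_ below)
def pyAppendLoop (nr : Int) (f : Int → Int) (m : List (List Int)) : List (List Int) :=
  (PySem.List.pyRange 0 nr 1).foldl
    (fun m r => PySem.List.pySetD m r ((PySem.List.pyGetD m r []) ++ [f r])) m

-- 'for i in range(len(eq_flags)): … eq_flags[i] …' iterated as its (index, value) stream (exact)
def convert_problem_to_standard_form (num_rows : Int) (num_cols : Int) (mat : List (List Int)) (obj_coefs : List Int) (rhs : List Int) (eq_flags : List Int) : Int × Int × List (List Int) × List Int × List Int :=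
  let st := (PySem.List.enumerate eq_flags).foldl
    (fun (st : Int × List (List Int) × List Int) p =>
      if p.2 == 0 then
        (st.1 + 1,
         pyAppendLoop num_rows (fun r => if p.1 == r then 1 else 0) st.2.1,
         st.2.2 ++ [0])
      else st)
    (num_cols, mat, obj_coefs)
  let m2 := pyAppendLoop num_rows (fun r => PySem.List.pyGetD rhs r 0) st.2.1
  (num_rows, st.1, m2, st.2.2, rhs)

-- ===== PORT B =====
def convert_problem_to_standard_form_alt (num_rows : Int) (num_cols : Int) (mat : List (List Int)) (obj_coefs : List Int) (rhs : List Int) (eq_flags : List Int) : Int × Int × List (List Int) × List Int × List Int :=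
  let slacks := ((PySem.List.enumerate eq_flags).filter (fun p => p.2 == 0)).map (fun p => p.1)
  let slack_col := (PySem.List.enumerate slacks).foldl
    (fun d p => PySem.Dict.insert d p.2 p.1) PySem.Dict.empty
  let k := slacks.length
  let mat2 := (PySem.List.pyRange 0 num_rows 1).foldl
    (fun m r =>
      let block := List.replicate k (0 : Int)
      let block := if slack_col.contains r then
          PySem.List.pySetD block (slack_col.getD r 0) 1 else block
      PySem.List.pySetD m r
        (PySem.List.pyGetD m r [] ++ (block ++ [PySem.List.pyGetD rhs r 0]))) mat
  (num_rows, num_cols + (k : Int), mat2, obj_coefs ++ List.replicate k 0, rhs)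

-- ===== PRECONDITION & SPEC =====
-- Pre_ excludes exactly the inputs where Python A raises IndexError: A reads mat[r] and rhs[r] for r < num_rows.
def Pre_convert_problem_to_standard_form (num_rows : Int) (num_cols : Int) (mat : List (List Int)) (obj_coefs : List Int) (rhs : List Int) (eq_flags : List Int) : Prop :=
  num_rows ≤ (mat.length : Int) ∧ num_rows ≤ (rhs.length : Int)
instance (num_rows : Int) (num_cols : Int) (mat : List (List Int)) (obj_coefs : List Int) (rhs : List Int) (eq_flags : List Int) : Decidable (Pre_convert_problem_to_standard_form num_rows num_cols mat obj_coefs rhs eq_flags) := by unfold Pre_convert_problem_to_standard_form; infer_instance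

def pvWitness_convert_problem_to_standard_form : Int × Int × List (List Int) × List Int × List Int × List Int :=
  (2, 2, [[1, 2], [3, 4]], [5, 6], [7, 8], [0, 1, 0])

def Spec_convert_problem_to_standard_form (num_rows : Int) (num_cols : Int) (mat : List (List Int)) (obj_coefs : List Int) (rhs : List Int) (eq_flags : List Int) (out : Int × Int × List (List Int) × List Int × List Int) : Prop := out = convert_problem_to_standard_form_alt num_rows num_cols mat obj_coefs rhs eq_flags
instance (num_rows : Int) (num_cols : Int) (mat : List (List Int)) (obj_coefs : List Int) (rhs : List Int) (eq_flags : List Int) (out : Int × Int × List (List Int) × List Int × List Int) : Decidable (Spec_convert_problem_to_standard_form num_rows num_cols mat obj_coefs rhs eq_flags out) := by unfold Spec_convert_problem_to_standard_form; infer_instance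

-- ===== CLAIM (what is proved, stated in full; the proofs are below) =====
def Claim_equal_convert_problem_to_standard_form : Prop := ∀ (num_rows : Int) (num_cols : Int) (mat : List (List Int)) (obj_coefs : List Int) (rhs : List Int) (eq_flags : List Int), Dom_convert_problem_to_standard_form num_rows num_cols mat obj_coefs rhs eq_flags → Pre_convert_problem_to_standard_form num_rows num_cols mat obj_coefs rhs eq_flags → Spec_convert_problem_to_standard_form num_rows num_cols mat obj_coefs rhs eq_flags (convert_problem_to_standard_form num_rows num_cols mat obj_coefs rhs eq_flags)

-- ===== LEMMAS AND PROOFS =====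

lemma pySetD_natCast {α : Type} (m : List α) (k : Nat) (v : α) :
    PySem.List.pySetD m (k : Int) v = m.set k v := by
  by_cases h : k < m.length
  · rw [PySem.List.pySetD, PySem.List.pySet?_natCast m k v h]; rfl
  · rw [PySem.List.pySetD, (PySem.List.pySet?_eq_none_iff m _ v).2, Option.getD_none,
        List.set_eq_of_length_le (by omega)]
    rw [PySem.Raise.InRange]
    intro hc
    exact absurd (by exact_mod_cast hc.2) h

-- the row loop 'for r in range(n): m[r] += g(r)' as a mapIdx
lemma rowAppend_foldl (n : Nat) (g : Nat → List Int) (m : List (List Int)) :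
    (List.range n).foldl (fun m r => m.set r ((m.getD r []) ++ g r)) m
      = m.mapIdx (fun r row => if r < n then row ++ g r else row) := by
  induction n with
  | zero =>
    apply List.ext_getElem <;> simp
  | succ n ih =>
    rw [List.range_succ, List.foldl_append, ih]
    simp only [List.foldl_cons, List.foldl_nil]
    apply List.ext_getElem
    · simp
    · intro i h1 h2
      simp only [List.getElem_set, List.getElem_mapIdx] at *
      by_cases hi : i = n
      · subst hi
        have hlen : i < m.length := by simpa using h2
        rw [if_pos rfl, List.getD_eq_getElem?_getD, List.getElem?_mapIdx]
        simp [hlen, List.getElem?_eq_getElem hlen]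
      · rw [if_neg (fun h => hi h.symm)]
        by_cases hlt : i < n
        · simp [hlt, Nat.lt_succ_of_lt hlt]
        · have h3 : ¬ i < n + 1 := by omega
          simp [hlt, h3]

lemma pyAppendLoop_eq (nr : Int) (f : Int → Int) (m : List (List Int)) :
    pyAppendLoop nr f m
      = m.mapIdx (fun r row => if r < nr.toNat then row ++ [f (r : Int)] else row) := by
  have h : pyAppendLoop nr f m
      = (List.range nr.toNat).foldl (fun m k => m.set k ((m.getD k []) ++ [f (k : Int)])) m := by
    unfold pyAppendLoop
    rw [PySem.List.pyRange_one, List.foldl_map]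
    simp only [zero_add, sub_zero, pySetD_natCast, PySem.List.pyGetD_natCast]
  rw [h, rowAppend_foldl]

lemma outer_fold_eq (nr : Int) (xs : List Int) :
    ∀ (s c : Int) (m : List (List Int)) (o : List Int),
    (PySem.List.enumerate xs s).foldl
      (fun (st : Int × List (List Int) × List Int) p =>
        if p.2 == 0 then
          (st.1 + 1,
           pyAppendLoop nr (fun r => if p.1 == r then 1 else 0) st.2.1,
           st.2.2 ++ [0])
        else st)
      (c, m, o)
    = (c + ((((PySem.List.enumerate xs s).filter (fun p => p.2 == 0)).map (fun p => p.1)).length : Int),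
       m.mapIdx (fun r row => if r < nr.toNat then
            row ++ (((PySem.List.enumerate xs s).filter (fun p => p.2 == 0)).map (fun p => p.1)).map
              (fun i => if i == (r : Int) then (1 : Int) else 0)
          else row),
       o ++ List.replicate (((PySem.List.enumerate xs s).filter (fun p => p.2 == 0)).map (fun p => p.1)).length 0) := by
  induction xs with
  | nil =>
    intro s c m o
    simp only [PySem.List.enumerate_nil, List.foldl_nil, List.filter_nil, List.map_nil,
      List.length_nil, List.replicate_zero, List.append_nil, Nat.cast_zero, add_zero]
    refine congrArg (fun z => (c, z, o)) ?_
    apply List.ext_getElem <;> simp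
  | cons x xs ih =>
    intro s c m o
    rw [PySem.List.enumerate_cons]
    simp only [List.foldl_cons, List.filter_cons]
    by_cases hx : x = 0
    · simp only [hx, BEq.rfl, if_pos, ih]
      rw [pyAppendLoop_eq, List.mapIdx_mapIdx]
      refine congrArg₂ (fun a z => (a, z)) (by simp; push_cast; ring) ?_
      refine congrArg₂ (fun z w => (z, w)) ?_ ?_
      · refine congrArg (fun g => List.mapIdx g m) ?_
        funext r row
        by_cases hr : r < nr.toNat <;>
          simp [hr, Function.comp, List.append_assoc]
      · simp [List.replicate_succ, List.append_assoc]
    · have hx' : (x == 0) = false := by simp [hx]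
      simp only [hx', Bool.false_eq_true, if_neg, ih, reduceCtorEq]
      simp [hx']

-- slack indices are strictly increasing, hence nodup
lemma slacks_nodup (xs : List Int) :
    (((PySem.List.enumerate xs).filter (fun p => p.2 == 0)).map (fun p => p.1)).Nodup := by
  have h := PySem.List.pairwise_lt_enumerate xs 0
  have h2 := List.Pairwise.filter (fun p => p.2 == 0) h
  have h3 : (((PySem.List.enumerate xs).filter (fun p => p.2 == 0)).map (fun p => p.1)).Pairwise (· < ·) := by
    rw [List.pairwise_map]; exact h2
  exact h3.imp ne_of_lt

-- the dict built from L maps L[c] to c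
lemma dict_items_eq (L : List Int) (hL : L.Nodup) :
    ((PySem.List.enumerate L).foldl
      (fun d p => PySem.Dict.insert d p.2 p.1) PySem.Dict.empty).items
      = (PySem.List.enumerate L).map (fun p => (p.2, p.1)) := by
  rw [PySem.Dict.items_foldl_insert_fresh]
  · rfl
  · intro a _; exact PySem.Dict.contains_empty _
  · rw [PySem.List.map_snd_enumerate]; exact hL

-- the one-hot block B builds equals the slack column vector A builds for row r
lemma block_eq (L : List Int) (hL : L.Nodup) (r : Int) :
    (let d := (PySem.List.enumerate L).foldl
        (fun d p => PySem.Dict.insert d p.2 p.1) PySem.Dict.empty;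
     if d.contains r then
        PySem.List.pySetD (List.replicate L.length (0 : Int)) (d.getD r 0) 1
      else List.replicate L.length (0 : Int))
    = L.map (fun i => if i == r then (1 : Int) else 0) := by
  simp only []
  set d := (PySem.List.enumerate L).foldl
      (fun d p => PySem.Dict.insert d p.2 p.1) PySem.Dict.empty with hd
  have hitems : d.items = (PySem.List.enumerate L).map (fun p => (p.2, p.1)) :=
    dict_items_eq L hL
  have hkeys : d.keys = L := by
    rw [PySem.Dict.keys, hitems, List.map_map]
    exact PySem.List.map_snd_enumerate L 0
  have hcont : d.contains r = decide (r ∈ L) := by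
    rw [PySem.Dict.contains_eq_decide_mem_keys, hkeys]
  by_cases hr : r ∈ L
  · obtain ⟨c, hc, hcr⟩ := List.mem_iff_getElem.1 hr
    have hmem : (r, (c : Int)) ∈ d.items := by
      rw [hitems]
      refine List.mem_map.2 ⟨((c : Int), r), ?_, rfl⟩
      rw [PySem.List.mem_enumerate_iff]
      exact ⟨c, hc, by simp [hcr]⟩
    have hgetD : d.getD r 0 = (c : Int) :=
      PySem.Dict.getD_of_mem_items d hmem (by rw [hkeys]; exact hL) 0
    simp only [hcont, hr, decide_true, if_pos, hgetD, pySetD_natCast]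
    apply List.ext_getElem
    · simp
    · intro j h1 h2
      simp only [List.getElem_set, List.getElem_replicate, List.getElem_map]
      have hjlen : j < L.length := by simpa using h1
      by_cases hjc : c = j
      · subst hjc; simp [hcr]
      · have : ¬ (L[j] = r) := by
          intro he
          exact hjc ((List.Nodup.getElem_inj_iff hL).1 (hcr.trans he.symm))
        simp [hjc, this]
  · simp only [hcont, hr, decide_false, Bool.false_eq_true, if_neg]
    apply List.ext_getElem
    · simp
    · intro j h1 h2
      have hjlen : j < L.length := by simpa using h1
      have : ¬ (L[j] = r) := fun he => hr (he ▸ List.getElem_mem hjlen)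
      simp [this]

-- B's row loop as a mapIdx
lemma alt_fold_eq (nr : Int) (body : Int → List Int) (m : List (List Int)) :
    (PySem.List.pyRange 0 nr 1).foldl
      (fun m r => PySem.List.pySetD m r (PySem.List.pyGetD m r [] ++ body r)) m
      = m.mapIdx (fun r row => if r < nr.toNat then row ++ body (r : Int) else row) := by
  have h : (PySem.List.pyRange 0 nr 1).foldl
      (fun m r => PySem.List.pySetD m r (PySem.List.pyGetD m r [] ++ body r)) m
      = (List.range nr.toNat).foldl (fun m k => m.set k ((m.getD k []) ++ body (k : Int))) m := by
    rw [PySem.List.pyRange_one, List.foldl_map]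
    simp only [zero_add, sub_zero, pySetD_natCast, PySem.List.pyGetD_natCast]
  rw [h, rowAppend_foldl]

-- ===== VERDICT (by name: the statement is the Claim_ definition above) =====
theorem convert_problem_to_standard_form_spec : Claim_equal_convert_problem_to_standard_form := by
  intro num_rows num_cols mat obj_coefs rhs eq_flags hdom hpre
  unfold Spec_convert_problem_to_standard_form
  unfold convert_problem_to_standard_form convert_problem_to_standard_form_alt
  simp only [outer_fold_eq, alt_fold_eq]
  simp only [pyAppendLoop_eq, List.mapIdx_mapIdx, Prod.mk.injEq, true_and, and_true]
  refine congrArg (fun g => List.mapIdx g mat) ?_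
  funext r row
  by_cases hr : r < num_rows.toNat
  · have hb := block_eq (((PySem.List.enumerate eq_flags).filter (fun p => p.2 == 0)).map (fun p => p.1))
      (slacks_nodup eq_flags) (r : Int)
    simp only [Function.comp, hr, if_pos]
    rw [← List.append_assoc]
    congr 1
    congr 1
    simpa using hb.symm
  · simp [hr, Function.comp]
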